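-- pv_equiv track=rewrite | github.com/widgetwalker/ML_Air_Pollution | src/context_enrichment.py | _calculate_overall_aqi
-- ===== SOURCE A (Python) =====
-- from typing import Dict, List, Tuple
--
-- def _calculate_overall_aqi(current_data: Dict) -> Dict[str, any]:
--     category_priority = {
--         'Good': 0,
--         'Moderate': 1,
--         'Unhealthy for Sensitive Groups': 2,
--         'Unhealthy': 3,
--         'Very Unhealthy': 4,
--         'Hazardous': 5,
--     }
--     worst_category = 'Good'
--     worst_pollutant = None
--     worst_priority = -1
--
--     for pollutant, data in current_data.items():
--         category = data.get('category', 'Good')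
--         priority = category_priority.get(category, 0)
--
--         if priority > worst_priority:
--             worst_priority = priority
--             worst_category = category
--             worst_pollutant = pollutant
--
--     return {
--         'category': worst_category,
--         'primary_pollutant': worst_pollutant,
--         'color': current_data.get(worst_pollutant, {}).get('color', 'green'),
--     }
-- ===== SOURCE B (Python) =====
-- def _calculate_overall_aqi(current_data):
--     category_priority = {
--         'Good': 0,
--         'Moderate': 1,
--         'Unhealthy for Sensitive Groups': 2,
--         'Unhealthy': 3,
--         'Very Unhealthy': 4,
--         'Hazardous': 5,
--     }
--     ranked = sorted(
--         current_data.items(),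
--         key=lambda kv: category_priority.get(kv[1].get('category', 'Good'), 0),
--         reverse=True,
--     )
--     if not ranked:
--         return {'category': 'Good', 'primary_pollutant': None, 'color': 'green'}
--     pollutant, data = ranked[0]
--     return {
--         'category': data.get('category', 'Good'),
--         'primary_pollutant': pollutant,
--         'color': data.get('color', 'green'),
--     }
-- ===== Notes on version B (the rewrite author's own statement) =====
-- stated objective: alternative
-- what changed: B ranks the pollutants by category priority with a stable descending sort and reads the worst one off the head of the sorted list, instead of A's running-maximum scan with a -1 sentinel and a second dict lookup for the color.
import Mathlib
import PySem

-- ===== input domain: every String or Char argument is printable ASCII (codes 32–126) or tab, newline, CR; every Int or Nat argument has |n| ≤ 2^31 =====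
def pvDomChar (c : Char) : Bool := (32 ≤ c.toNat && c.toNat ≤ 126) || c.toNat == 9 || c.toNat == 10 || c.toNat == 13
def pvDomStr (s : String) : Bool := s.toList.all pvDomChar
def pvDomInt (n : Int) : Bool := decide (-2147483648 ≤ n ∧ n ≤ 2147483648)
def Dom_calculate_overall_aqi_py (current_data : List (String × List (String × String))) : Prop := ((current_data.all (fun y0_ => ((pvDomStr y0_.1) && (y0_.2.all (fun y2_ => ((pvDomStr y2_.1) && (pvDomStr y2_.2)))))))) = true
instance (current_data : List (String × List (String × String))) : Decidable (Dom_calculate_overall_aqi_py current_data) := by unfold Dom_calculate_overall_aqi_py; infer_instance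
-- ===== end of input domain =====

-- B replaces A's running-maximum scan (with -1 sentinel and a final dict lookup for the
-- color) by a stable descending sort on category priority, taking the head as the worst.

-- ===== PORT A =====
-- the category_priority dict literal shared by A and B's key function
def pvCategoryPriority : PySem.Dict String Int :=
  PySem.Dict.ofList [("Good", 0), ("Moderate", 1), ("Unhealthy for Sensitive Groups", 2),
                     ("Unhealthy", 3), ("Very Unhealthy", 4), ("Hazardous", 5)]

-- data.get('category', 'Good')
def pvCat (data : List (String × String)) : String :=
  (PySem.Dict.ofList data).getD "category" "Good"

def calculate_overall_aqi_py (current_data : List (String × List (String × String))) : List (String × Option String) :=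
  let d := PySem.Dict.ofList current_data
  let st := d.items.foldl
    (fun (st : String × Option String × Int) kv =>
      let category := pvCat kv.2
      let priority := pvCategoryPriority.getD category 0
      if st.2.2 < priority then (category, some kv.1, priority) else st)
    ("Good", none, -1)
  [("category", some st.1),
   ("primary_pollutant", st.2.1),
   ("color", some (match st.2.1 with
      | none => "green"   -- current_data.get(None, {}) is {} : no string key equals None
      | some p => (PySem.Dict.ofList ((d.get? p).getD [])).getD "color" "green"))]

-- ===== PORT B =====
-- the sort key: category_priority.get(kv[1].get('category', 'Good'), 0)
def pvKey (kv : String × List (String × String)) : Int :=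
  pvCategoryPriority.getD (pvCat kv.2) 0

def calculate_overall_aqi_py_alt (current_data : List (String × List (String × String))) : List (String × Option String) :=
  let d := PySem.Dict.ofList current_data
  match PySem.List.sorted d.items pvKey true with
  | [] =>
      [("category", some "Good"), ("primary_pollutant", none), ("color", some "green")]
  | kv :: _ =>
      [("category", some (pvCat kv.2)),
       ("primary_pollutant", some kv.1),
       ("color", some ((PySem.Dict.ofList kv.2).getD "color" "green"))]

-- ===== PRECONDITION & SPEC =====
def Spec_calculate_overall_aqi_py (current_data : List (String × List (String × String))) (out : List (String × Option String)) : Prop := out = calculate_overall_aqi_py_alt current_data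
instance (current_data : List (String × List (String × String))) (out : List (String × Option String)) : Decidable (Spec_calculate_overall_aqi_py current_data out) := by unfold Spec_calculate_overall_aqi_py; infer_instance

-- ===== CLAIM (what is proved, stated in full; the proofs are below) =====
def Claim_equal_calculate_overall_aqi_py : Prop := ∀ (current_data : List (String × List (String × String))), Dom_calculate_overall_aqi_py current_data → Spec_calculate_overall_aqi_py current_data (calculate_overall_aqi_py current_data)

-- ===== LEMMAS AND PROOFS =====

theorem pvPrio_nonneg (c : String) : 0 ≤ pvCategoryPriority.getD c 0 := by
  have h : pvCategoryPriority = PySem.Dict.mk [("Good", 0), ("Moderate", 1),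
      ("Unhealthy for Sensitive Groups", 2), ("Unhealthy", 3), ("Very Unhealthy", 4),
      ("Hazardous", 5)] := by decide
  rw [h, PySem.Dict.getD_eq_get?_getD]
  simp only [PySem.Dict.get?_mk_cons]
  split_ifs <;> simp [PySem.Dict.get?]

-- the "first running maximum" of pvKey, seeded with h
def pvRunHead (l : List (String × List (String × String))) (h : String × List (String × String)) :
    String × List (String × String) :=
  l.foldl (fun h x => if pvKey h < pvKey x then x else h) h

theorem pvRunHead_cons (x : String × List (String × String)) (t : List (String × List (String × String))) (h : String × List (String × String)) :
    pvRunHead (x :: t) h = pvRunHead t (if pvKey h < pvKey x then x else h) := rfl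

theorem pvRunHead_mem (l : List (String × List (String × String))) (h : String × List (String × String)) :
    pvRunHead l h ∈ h :: l := by
  induction l generalizing h with
  | nil => simp [pvRunHead]
  | cons x t ih =>
      rw [pvRunHead_cons]
      rcases List.mem_cons.1 (ih (if pvKey h < pvKey x then x else h)) with m | m
      · rw [m]; split <;> simp
      · simp [m]

-- head of the stable reverse-sorted accumulation is the first running maximum
theorem head_foldl_insertBy (l : List (String × List (String × String)))
    (acc : List (String × List (String × String))) (h : String × List (String × String))
    (hh : acc.head? = some h) :
    (l.foldl (fun acc x => PySem.List.insertBy (fun a b => decide (pvKey b < pvKey a)) x acc) acc).head?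
      = some (pvRunHead l h) := by
  induction l generalizing acc h with
  | nil => simpa [pvRunHead]
  | cons x t ih =>
      simp only [List.foldl_cons, pvRunHead_cons]
      cases acc with
      | nil => simp at hh
      | cons y ys =>
          obtain rfl : y = h := by simpa using hh
          apply ih
          by_cases hc : pvKey y < pvKey x <;>
            simp [PySem.List.insertBy, hc]

-- A's fold agrees with the running maximum once seeded with a real element
theorem foldA_eq_runHead (l : List (String × List (String × String)))
    (h : String × List (String × String)) :
    (l.foldl
      (fun (st : String × Option String × Int) kv =>
        let category := pvCat kv.2
        let priority := pvCategoryPriority.getD category 0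
        if st.2.2 < priority then (category, some kv.1, priority) else st)
      (pvCat h.2, some h.1, pvKey h))
      = (pvCat (pvRunHead l h).2, some (pvRunHead l h).1, pvKey (pvRunHead l h)) := by
  induction l generalizing h with
  | nil => simp [pvRunHead]
  | cons x t ih =>
      simp only [List.foldl_cons, pvRunHead_cons, pvKey] at *
      by_cases hc : pvCategoryPriority.getD (pvCat h.2) 0 < pvCategoryPriority.getD (pvCat x.2) 0
      · simpa [hc] using ih x
      · simpa [hc] using ih h

-- ===== VERDICT (by name: the statement is the Claim_ definition above) =====
theorem calculate_overall_aqi_py_spec : Claim_equal_calculate_overall_aqi_py := by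
  intro current_data _
  unfold Spec_calculate_overall_aqi_py calculate_overall_aqi_py calculate_overall_aqi_py_alt
  have hnd : (PySem.Dict.ofList current_data).keys.Nodup := PySem.Dict.nodup_keys_ofList _
  set d := PySem.Dict.ofList current_data with hd
  cases hi : d.items with
  | nil => simp [hi, PySem.List.sorted]
  | cons kv rest =>
      -- A's fold: the first element replaces the -1 sentinel, then it is the running maximum
      have h0 : (0:Int) ≤ pvKey kv := pvPrio_nonneg _
      have hA : (kv :: rest).foldl
          (fun (st : String × Option String × Int) kv =>
            let category := pvCat kv.2
            let priority := pvCategoryPriority.getD category 0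
            if st.2.2 < priority then (category, some kv.1, priority) else st)
          ("Good", none, -1)
          = (pvCat (pvRunHead rest kv).2, some (pvRunHead rest kv).1, pvKey (pvRunHead rest kv)) := by
        rw [List.foldl_cons]
        have : ((("Good", none, -1) : String × Option String × Int).2.2 <
            pvCategoryPriority.getD (pvCat kv.2) 0) := by
          simp only [pvKey] at h0
          show (-1:Int) < _
          omega
        simp only [if_pos this]
        exact foldA_eq_runHead rest kv
      -- B's sort: its head is the same running maximum
      have hs : (PySem.List.sorted (kv :: rest) pvKey true).head? = some (pvRunHead rest kv) := by
        rw [PySem.List.sorted_rev_eq_foldl_insertBy, List.foldl_cons]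
        exact head_foldl_insertBy rest (PySem.List.insertBy _ kv []) kv (by simp [PySem.List.insertBy])
      have hm : d.get? (pvRunHead rest kv).1 = some (pvRunHead rest kv).2 := by
        have hmem : pvRunHead rest kv ∈ d.items := by
          rw [hi]; exact pvRunHead_mem rest kv
        exact PySem.Dict.get?_of_mem_items d (by simpa using hmem) hnd
      cases hq : PySem.List.sorted (kv :: rest) pvKey true with
      | nil => rw [hq] at hs; simp at hs
      | cons m tl =>
          rw [hq] at hs
          obtain rfl : m = pvRunHead rest kv := by simpa using hs
          simp only [hi, hA, hq, hm]
          simp
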